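-- pv_equiv track=rewrite | github.com/foxsake123/ai-stock-trading-bot | 01_trading_system/bots/dee_bot/risk_manager_leveraged.py | check_correlation_risk
-- ===== SOURCE A (Python) =====
-- from typing import Dict, List, Tuple
--
-- def check_correlation_risk(new_positions: List[str]) -> bool:
--     """Check if new positions are too correlated"""
--     # Simplified correlation check
--     # In production, would calculate actual correlation matrix
--
--     # High correlation groups
--     tech_stocks = {'AAPL', 'MSFT', 'GOOGL', 'META', 'NVDA', 'AMD'}
--     financials = {'JPM', 'BAC', 'GS', 'MS', 'C', 'WFC'}
--
--     # Check concentration in sectors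
--     tech_count = sum(1 for p in new_positions if p in tech_stocks)
--     financial_count = sum(1 for p in new_positions if p in financials)
--
--     # Don't allow more than 3 positions in same sector with leverage
--     if tech_count > 3 or financial_count > 3:
--         return False
--
--     return True
-- ===== SOURCE B (Python) =====
-- _TECH = {'AAPL', 'MSFT', 'GOOGL', 'META', 'NVDA', 'AMD'}
-- _FIN = {'JPM', 'BAC', 'GS', 'MS', 'C', 'WFC'}
--
--
-- def _sector(symbol):
--     if symbol in _TECH:
--         return 'tech'
--     if symbol in _FIN:
--         return 'fin'
--     return None
--
--
-- def check_correlation_risk(new_positions):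
--     """One pass: classify each symbol, tally per sector, bail out early."""
--     counts = {}
--     for p in new_positions:
--         s = _sector(p)
--         if s is None:
--             continue
--         c = counts.get(s, 0) + 1
--         if c > 3:
--             return False
--         counts[s] = c
--     return True
-- ===== Notes on version B (the rewrite author's own statement) =====
-- stated objective: alternative
-- what changed: Replaces A's two separate full membership-scans (one per sector) with a single pass that classifies each symbol via a sector helper, maintains a per-sector tally dict, and returns False early as soon as any tally exceeds 3.
import Mathlib
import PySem

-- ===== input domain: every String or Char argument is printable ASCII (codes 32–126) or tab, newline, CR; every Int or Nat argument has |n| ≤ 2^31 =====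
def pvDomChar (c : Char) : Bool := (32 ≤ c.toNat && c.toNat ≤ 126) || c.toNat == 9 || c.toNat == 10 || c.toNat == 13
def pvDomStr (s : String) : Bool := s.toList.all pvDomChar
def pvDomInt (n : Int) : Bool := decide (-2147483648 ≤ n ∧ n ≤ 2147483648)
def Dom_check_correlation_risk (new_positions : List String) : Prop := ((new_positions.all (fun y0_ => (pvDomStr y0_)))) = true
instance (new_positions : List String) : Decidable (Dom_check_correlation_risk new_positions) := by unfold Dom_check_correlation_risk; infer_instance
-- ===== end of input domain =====

-- B replaces A's two separate sector membership-scans with one table-driven pass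
-- tallying per-sector counts in a dict and returning False early (objective: alternative).


-- ===== PORT A =====
def techStocks : PySem.Set String :=
  PySem.Set.ofList ["AAPL", "MSFT", "GOOGL", "META", "NVDA", "AMD"]

def financials : PySem.Set String :=
  PySem.Set.ofList ["JPM", "BAC", "GS", "MS", "C", "WFC"]

def check_correlation_risk (new_positions : List String) : Bool :=
  let tech_count : Int :=
    new_positions.foldl (fun acc p => if PySem.Set.contains techStocks p then acc + 1 else acc) 0
  let financial_count : Int :=
    new_positions.foldl (fun acc p => if PySem.Set.contains financials p then acc + 1 else acc) 0
  if tech_count > 3 || financial_count > 3 then false else true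

-- ===== PORT B =====
def sectorOf (symbol : String) : Option String :=
  if PySem.Set.contains techStocks symbol then some "tech"
  else if PySem.Set.contains financials symbol then some "fin"
  else none

def altLoop : List String → PySem.Dict String Int → Bool
  | [], _ => true
  | p :: rest, counts =>
    match sectorOf p with
    | none => altLoop rest counts
    | some s =>
      let c : Int := counts.getD s 0 + 1
      if c > 3 then false else altLoop rest (counts.insert s c)

def check_correlation_risk_alt (new_positions : List String) : Bool :=
  altLoop new_positions PySem.Dict.empty

-- ===== PRECONDITION & SPEC =====
def Spec_check_correlation_risk (new_positions : List String) (out : Bool) : Prop := out = check_correlation_risk_alt new_positions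
instance (new_positions : List String) (out : Bool) : Decidable (Spec_check_correlation_risk new_positions out) := by unfold Spec_check_correlation_risk; infer_instance

-- ===== CLAIM (what is proved, stated in full; the proofs are below) =====
def Claim_equal_check_correlation_risk : Prop := ∀ (new_positions : List String), Dom_check_correlation_risk new_positions → Spec_check_correlation_risk new_positions (check_correlation_risk new_positions)

-- ===== LEMMAS AND PROOFS =====

/-- Number of elements of `l` contained in set `s` (proof-side characterisation). -/
def cntS (s : PySem.Set String) : List String → Int
  | [] => 0
  | p :: rest => (if PySem.Set.contains s p then 1 else 0) + cntS s rest

theorem cntS_nonneg (s : PySem.Set String) (l : List String) : 0 ≤ cntS s l := by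
  induction l with
  | nil => simp [cntS]
  | cons p rest ih => simp only [cntS]; split <;> omega

theorem foldl_cntS (s : PySem.Set String) (l : List String) (acc : Int) :
    l.foldl (fun a p => if PySem.Set.contains s p then a + 1 else a) acc = acc + cntS s l := by
  induction l generalizing acc with
  | nil => simp [cntS]
  | cons p rest ih =>
    simp only [List.foldl, cntS]
    split <;> rw [ih] <;> ring

theorem sector_disj (p : String) (h : PySem.Set.contains techStocks p = true) :
    PySem.Set.contains financials p = false := by
  have h' : p = "AAPL" ∨ p = "MSFT" ∨ p = "GOOGL" ∨ p = "META" ∨ p = "NVDA" ∨ p = "AMD" := by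
    simpa [techStocks, PySem.Set.contains] using h
  rcases h' with rfl | rfl | rfl | rfl | rfl | rfl <;> decide

theorem altLoop_eq (l : List String) (counts : PySem.Dict String Int)
    (ht : counts.getD "tech" 0 ≤ 3) (hf : counts.getD "fin" 0 ≤ 3) :
    altLoop l counts =
      decide (cntS techStocks l + counts.getD "tech" 0 ≤ 3 ∧
              cntS financials l + counts.getD "fin" 0 ≤ 3) := by
  induction l generalizing counts with
  | nil => simp [altLoop, cntS, ht, hf]
  | cons p rest ih =>
    by_cases htech : PySem.Set.contains techStocks p = true
    · have hfin : PySem.Set.contains financials p = false := sector_disj p htech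
      simp only [altLoop, sectorOf, htech, if_true, cntS, hfin, Bool.false_eq_true, if_false]
      by_cases hgt : counts.getD "tech" 0 + 1 > 3
      · have h4 := cntS_nonneg techStocks rest
        simp only [hgt, if_true]
        rw [eq_comm, decide_eq_false_iff_not]
        intro ⟨h1, _⟩
        omega
      · simp only [hgt, if_false]
        rw [ih _ (by rw [PySem.Dict.getD_insert_self]; omega)
              (by rw [PySem.Dict.getD_insert_of_ne counts _ _ (by decide)]; exact hf),
            PySem.Dict.getD_insert_self,
            PySem.Dict.getD_insert_of_ne counts _ _ (show ("fin" : String) ≠ "tech" by decide),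
            decide_eq_decide]
        omega
    · have htech' : PySem.Set.contains techStocks p = false := by simpa using htech
      by_cases hfin : PySem.Set.contains financials p = true
      · simp only [altLoop, sectorOf, htech', hfin, if_true, cntS, Bool.false_eq_true, if_false]
        by_cases hgt : counts.getD "fin" 0 + 1 > 3
        · have h4 := cntS_nonneg financials rest
          simp only [hgt, if_true]
          rw [eq_comm, decide_eq_false_iff_not]
          intro ⟨_, h2⟩
          omega
        · simp only [hgt, if_false]
          rw [ih _ (by rw [PySem.Dict.getD_insert_of_ne counts _ _ (by decide)]; exact ht)
                (by rw [PySem.Dict.getD_insert_self]; omega),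
              PySem.Dict.getD_insert_self,
              PySem.Dict.getD_insert_of_ne counts _ _ (show ("tech" : String) ≠ "fin" by decide),
              decide_eq_decide]
          omega
      · have hfin' : PySem.Set.contains financials p = false := by simpa using hfin
        simp only [altLoop, sectorOf, htech', hfin', Bool.false_eq_true, if_false, cntS]
        rw [ih counts ht hf, decide_eq_decide]
        omega

-- ===== VERDICT (by name: the statement is the Claim_ definition above) =====
theorem check_correlation_risk_spec : Claim_equal_check_correlation_risk := by
  intro np _
  unfold Spec_check_correlation_risk check_correlation_risk check_correlation_risk_alt
  rw [altLoop_eq np PySem.Dict.empty (by simp [PySem.Dict.getD_empty]) (by simp [PySem.Dict.getD_empty])]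
  simp only [foldl_cntS, zero_add, PySem.Dict.getD_empty, add_zero]
  by_cases h1 : cntS techStocks np > 3 <;> by_cases h2 : cntS financials np > 3 <;>
    simp [h1, h2] <;> omega
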